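-- pv_equiv track=rewrite | github.com/dipansharora810/Simple_knowledge_base | kb.py | valid_input_load
-- ===== SOURCE A (Python) =====
-- def is_atom(s):
--     if not isinstance(s, str):
--         return False
--     if s == "":
--         return False
--     return is_letter(s[0]) and all(is_letter(c) or c.isdigit() for c in s[1:])
--
-- def is_letter(s):
--     return len(s) == 1 and s.lower() in "_abcdefghijklmnopqrstuvwxyz"
--
-- def valid_input_load(lines):
--     for x in range(len(lines)):
--         words = lines[x].split()
--         for y in range(len(words)):
--
--             if(y==0 or y%2==0):
--                 if(is_atom(words[y])==False):
--                     return False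
--             elif y==1:
--                    if(words[y]!="<--"):
--                         return False
--             else:
--                    if(words[y]!='&'):
--                         return False
--     return True
-- ===== SOURCE B (Python) =====
-- def _letter(c):
--     return c.lower() in "_abcdefghijklmnopqrstuvwxyz"
--
-- def _kind(w):
--     if w == "<--":
--         return "arrow"
--     if w == "&":
--         return "amp"
--     if w != "" and _letter(w[0]) and all(_letter(c) or c.isdigit() for c in w[1:]):
--         return "atom"
--     return "other"
--
-- # table-driven finite automaton over token kinds; every state is accepting
-- _NEXT = {(0, "atom"): 1, (1, "arrow"): 2, (2, "atom"): 3, (3, "amp"): 2}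
--
-- def valid_input_load(lines):
--     for line in lines:
--         state = 0
--         for w in line.split():
--             state = _NEXT.get((state, _kind(w)))
--             if state is None:
--                 return False
--     return True
-- ===== Notes on version B (the rewrite author's own statement) =====
-- stated objective: alternative
-- what changed: Replaces A's index-parity loop (y==0/even, y==1, else branches) by a table-driven finite automaton: each token is classified into a kind (atom/arrow/amp/other) and a 4-state transition table is consulted; a line is rejected exactly when the automaton gets stuck.
import Mathlib
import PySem

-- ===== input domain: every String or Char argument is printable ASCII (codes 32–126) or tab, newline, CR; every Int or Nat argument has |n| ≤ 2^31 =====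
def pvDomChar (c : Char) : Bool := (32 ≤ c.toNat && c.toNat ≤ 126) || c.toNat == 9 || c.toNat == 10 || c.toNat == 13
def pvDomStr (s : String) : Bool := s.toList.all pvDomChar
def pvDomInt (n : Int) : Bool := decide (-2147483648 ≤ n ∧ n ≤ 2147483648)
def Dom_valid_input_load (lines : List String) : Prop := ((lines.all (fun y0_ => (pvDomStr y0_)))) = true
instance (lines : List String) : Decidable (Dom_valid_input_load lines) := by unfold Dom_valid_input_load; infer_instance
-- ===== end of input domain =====

-- B validates each line with a table-driven finite automaton over token kinds
-- (atom / '<--' / '&' / other) instead of A's index-parity loop; same cost,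
-- a different decomposition.

-- ===== PORT A =====
def aIsLetter (s : String) : Bool :=
  PySem.Str.len s == 1 && PySem.Str.isIn (PySem.Str.lower s) "_abcdefghijklmnopqrstuvwxyz"

def aIsAtom (s : String) : Bool :=
  if s == "" then false
  else
    match PySem.Str.pyGet? s 0 with
    | none => false  -- unreachable: s ≠ "" so s[0] exists
    | some c =>
        aIsLetter (String.ofList [c]) &&
          (PySem.Chars.slice s.toList (some 1) none).all
            (fun ch => aIsLetter (String.ofList [ch]) || PySem.Chars.isdigit ch)

-- the inner 'for y in range(len(words))' with early return, carrying the index y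
def aInner : List String → Nat → Bool
  | [], _ => true
  | w :: ws, y =>
    if y == 0 || y % 2 == 0 then
      if aIsAtom w == false then false else aInner ws (y + 1)
    else if y == 1 then
      if w != "<--" then false else aInner ws (y + 1)
    else
      if w != "&" then false else aInner ws (y + 1)

def valid_input_load : List String → Bool
  | [] => true
  | l :: ls => if aInner (PySem.Str.split₀ l) 0 then valid_input_load ls else false

-- ===== PORT B =====
def bLetter (c : Char) : Bool :=
  PySem.Chars.isIn (PySem.Chars.lower [c]) "_abcdefghijklmnopqrstuvwxyz".toList

inductive BKind | arrow | amp | atom | other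
deriving DecidableEq, Repr

-- _kind: classify a token (w != "" / w[0] / w[1:] rendered as a head/tail match; exact)
def bKind (w : String) : BKind :=
  if w == "<--" then .arrow
  else if w == "&" then .amp
  else match w.toList with
    | [] => .other
    | c :: cs =>
        if bLetter c && cs.all (fun d => bLetter d || PySem.Chars.isdigit d) then .atom
        else .other

-- the static table _NEXT, as the lookup function it denotes
def bNext : Nat → BKind → Option Nat
  | 0, .atom => some 1
  | 1, .arrow => some 2
  | 2, .atom => some 3
  | 3, .amp => some 2
  | _, _ => none

-- the inner token loop: advance the state, stop with False when the table has no entry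
def bRun : Nat → List String → Bool
  | _, [] => true
  | s, w :: ws =>
    match bNext s (bKind w) with
    | none => false
    | some s' => bRun s' ws

def valid_input_load_alt : List String → Bool
  | [] => true
  | l :: ls => if bRun 0 (PySem.Str.split₀ l) then valid_input_load_alt ls else false

-- ===== PRECONDITION & SPEC =====
def Spec_valid_input_load (lines : List String) (out : Bool) : Prop := out = valid_input_load_alt lines
instance (lines : List String) (out : Bool) : Decidable (Spec_valid_input_load lines out) := by unfold Spec_valid_input_load; infer_instance

-- ===== CLAIM (what is proved, stated in full; the proofs are below) =====
def Claim_equal_valid_input_load : Prop := ∀ (lines : List String), Dom_valid_input_load lines → Spec_valid_input_load lines (valid_input_load lines)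

-- ===== LEMMAS AND PROOFS =====

-- A's atom test holds exactly when B classifies the token as an atom
lemma atom_kind (w : String) : aIsAtom w = true ↔ bKind w = .atom := by
  by_cases h1 : w = "<--"
  · subst h1; decide
  by_cases h2 : w = "&"
  · subst h2; decide
  cases h : w.toList with
  | nil =>
    have : w = "" := by
      have := congrArg String.ofList h; simpa using this
    subst this; decide
  | cons c cs =>
    have hne : ¬ (w == "") := by
      intro hb
      have : w = "" := by simpa using hb
      rw [this] at h; simp at h
    have hld : ∀ d, aIsLetter (String.ofList [d]) = bLetter d := by
      intro d
      simp [aIsLetter, bLetter, PySem.Str.len, PySem.Str.isIn, PySem.Str.lower]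
    simp [aIsAtom, bKind, hne, h, h1, h2, PySem.List.slice_from_one, hld]
    intro _
    refine ⟨fun hcs d hd hnl => ?_, fun hcs d hd => ?_⟩
    · rcases hcs d hd with hb | hb
      · rw [hb] at hnl; simp at hnl
      · exact hb
    · by_cases hb : bLetter d = true
      · exact Or.inl hb
      · exact Or.inr (hcs d hd (by simpa using hb))

lemma kind_arrow (w : String) : bKind w = .arrow ↔ w = "<--" := by
  unfold bKind
  split_ifs with ha hb
  · simp_all
  · simp_all
  · cases h : w.toList with
    | nil => simp_all
    | cons c cs => split <;> simp_all <;> split_ifs <;> simp_all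

lemma kind_amp (w : String) : bKind w = .amp ↔ w = "&" := by
  unfold bKind
  split_ifs with ha hb
  · simp_all
  · simp_all
  · cases h : w.toList with
    | nil => simp_all
    | cons c cs => split <;> simp_all <;> split_ifs <;> simp_all

-- A's indexed loop simulates B's automaton: index 0 ↔ state 0, index 1 ↔ state 1,
-- even index ≥ 2 ↔ state 2, odd index ≥ 3 ↔ state 3
lemma inner_run (ws : List String) : ∀ k : Nat,
    aInner ws 0 = bRun 0 ws ∧ aInner ws 1 = bRun 1 ws ∧
    aInner ws (2 * k + 2) = bRun 2 ws ∧ aInner ws (2 * k + 3) = bRun 3 ws := by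
  induction ws with
  | nil => intro k; exact ⟨rfl, rfl, rfl, rfl⟩
  | cons w ws ih =>
    intro k
    refine ⟨?_, ?_, ?_, ?_⟩
    · -- index 0 / state 0: atom expected
      by_cases ha : aIsAtom w = true
      · have hk : bKind w = .atom := (atom_kind w).1 ha
        simp [aInner, bRun, ha, hk, bNext, (ih k).2.1]
      · have hk : bKind w ≠ .atom := fun h => ha ((atom_kind w).2 h)
        cases hkk : bKind w <;> simp [aInner, bRun, ha, bNext] <;> simp_all
    · -- index 1 / state 1: arrow expected
      by_cases hw : w = "<--"
      · have hk : bKind w = .arrow := (kind_arrow w).2 hw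
        have h2 : aInner ws 2 = bRun 2 ws := by simpa using (ih 0).2.2.1
        subst hw
        simp [aInner, bRun, bNext, hk, h2]
      · have hk : bKind w ≠ .arrow := fun h => hw ((kind_arrow w).1 h)
        cases hkk : bKind w <;> simp [aInner, bRun, hw, bNext] <;> simp_all
    · -- even index ≥ 2 / state 2: atom expected
      have h2 : (2 * k + 2) % 2 = 0 := by omega
      have h3 : 2 * k + 2 + 1 = 2 * k + 3 := by omega
      by_cases ha : aIsAtom w = true
      · have hk : bKind w = .atom := (atom_kind w).1 ha
        simp [aInner, bRun, ha, hk, bNext, h2, h3, (ih k).2.2.2]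
      · have hk : bKind w ≠ .atom := fun h => ha ((atom_kind w).2 h)
        cases hkk : bKind w <;> simp [aInner, bRun, ha, bNext, h2] <;> simp_all
    · -- odd index ≥ 3 / state 3: '&' expected
      have hne0 : ¬ ((2 * k + 3) % 2 = 0) := by omega
      have hne1 : ¬ (2 * k + 3 = 1) := by omega
      have h3 : 2 * k + 3 + 1 = 2 * (k + 1) + 2 := by omega
      by_cases hw : w = "&"
      · have hk : bKind w = .amp := (kind_amp w).2 hw
        subst hw
        simp [aInner, bRun, bNext, hk, h3, (ih (k + 1)).2.2.1]
      · have hk : bKind w ≠ .amp := fun h => hw ((kind_amp w).1 h)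
        cases hkk : bKind w <;> simp [aInner, bRun, hw, bNext] <;> simp_all

-- ===== VERDICT (by name: the statement is the Claim_ definition above) =====
theorem valid_input_load_spec : Claim_equal_valid_input_load := by
  intro lines _
  unfold Spec_valid_input_load
  clear ‹Dom_valid_input_load lines›
  induction lines with
  | nil => rfl
  | cons l ls ih =>
    simp [valid_input_load, valid_input_load_alt, (inner_run (PySem.Str.split₀ l) 0).1, ih]
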